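-- pv_equiv track=rewrite | github.com/7shi/dante-norton | tokenize/tokenizer.py | split_on_apostrophes
-- ===== SOURCE A (Python) =====
-- from typing import List
--
-- def split_on_apostrophes(text: str) -> List[str]:
--     """
--     Split text on apostrophes based on context.
--
--     Rule: If the character before apostrophe is alpha, split after apostrophe.
--     Otherwise, split before apostrophe.
--
--     Args:
--         text: Input text to split on apostrophes.
--
--     Returns:
--         List of text parts split at apostrophe boundaries.
--
--     Examples:
--         "ch'i'" -> ["ch'", "i'"]
--         "l'altre" -> ["l'", "altre"]
--         "'nferno" -> ["'nferno"]
--     """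
--     # Return empty list for empty input
--     if not text:
--         return []
--
--     parts = []
--     s = ""  # Current segment being built
--     prev_is_alpha = False
--
--     # Process each character in the text
--     for ch in text:
--         if ch == "'":
--             if prev_is_alpha:
--                 # Alpha before apostrophe: split after apostrophe (e.g., "l'")
--                 parts.append(s + ch)
--                 s = ""
--             else:
--                 # Non-alpha before apostrophe: split before apostrophe (e.g., "'nferno")
--                 if s:
--                     parts.append(s)
--                 s = ch
--         else:
--             s += ch
--         # Track whether current character is alphabetic for next iteration
--         prev_is_alpha = ch.isalpha()
--
--     # Append any remaining segment
--     if s: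
--         parts.append(s)
--
--     return parts
-- ===== SOURCE B (Python) =====
-- from typing import List
--
-- def split_on_apostrophes(text: str) -> List[str]:
--     """Right-to-left scan: each apostrophe closes the segment on its right
--     (or on its left, when preceded by a letter); segments are collected in
--     reverse and flipped once at the end."""
--     segs = []
--     cur = ""
--     i = len(text) - 1
--     while i >= 0:
--         c = text[i]
--         if c == "'":
--             if i > 0 and text[i - 1].isalpha():
--                 # letter before: apostrophe ends the segment to its LEFT,
--                 # so the piece accumulated to its right is complete
--                 if cur:
--                     segs.append(cur)
--                 cur = "'"
--             else:
--                 # apostrophe starts a segment: close "'"+cur here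
--                 segs.append("'" + cur)
--                 cur = ""
--         else:
--             cur = c + cur
--         i -= 1
--     if cur:
--         segs.append(cur)
--     segs.reverse()
--     return segs
-- ===== Notes on version B (the rewrite author's own statement) =====
-- stated objective: alternative
-- what changed: Replaces A's left-to-right fold that carries a prev_is_alpha flag and a growing parts list with a right-to-left scan that inspects each apostrophe's left neighbour directly by index and builds the segment list back-to-front, reversing once at the end.
import Mathlib
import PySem

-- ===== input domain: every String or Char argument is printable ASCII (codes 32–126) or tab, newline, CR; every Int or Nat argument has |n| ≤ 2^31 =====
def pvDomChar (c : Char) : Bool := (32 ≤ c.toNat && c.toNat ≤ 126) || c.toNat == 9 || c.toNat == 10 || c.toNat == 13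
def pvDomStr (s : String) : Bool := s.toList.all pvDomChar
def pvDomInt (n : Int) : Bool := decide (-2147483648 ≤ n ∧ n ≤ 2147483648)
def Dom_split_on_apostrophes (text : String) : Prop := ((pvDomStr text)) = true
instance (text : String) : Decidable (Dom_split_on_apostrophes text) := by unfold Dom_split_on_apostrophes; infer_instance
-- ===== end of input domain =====

-- B replaces A's single left-to-right fold with carried prev-is-alpha state by a
-- right-to-left scan that inspects the apostrophe's left neighbour directly and
-- builds the result back-to-front (objective: alternative decomposition; not faster).

-- ===== PORT A =====
-- state: (parts, current segment s, prev_is_alpha)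
def pvStepA (st : List String × List Char × Bool) (ch : Char) :
    List String × List Char × Bool :=
  let (parts, s, prev) := st
  if ch = '\'' then
    if prev then
      (parts ++ [String.mk (s ++ [ch])], [], PySem.Chars.isalpha ch)
    else
      ((if s = [] then parts else parts ++ [String.mk s]), [ch], PySem.Chars.isalpha ch)
  else
    (parts, s ++ [ch], PySem.Chars.isalpha ch)

def split_on_apostrophes (text : String) : List String :=
  if text.toList = [] then []
  else
    let st := text.toList.foldl pvStepA ([], [], false)
    st.1 ++ (if st.2.1 = [] then [] else [String.mk st.2.1])

-- ===== PORT B =====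
-- rs = the not-yet-scanned characters in reverse order (head = rightmost remaining),
-- cur = the segment accumulating to the right of the scan point.
-- "i > 0 and text[i-1].isalpha()": in reverse order, the left neighbour is rest's head
def pvLeftAlpha : List Char → Bool
  | p :: _ => PySem.Chars.isalpha p
  | [] => false

def pvGoB : List Char → List Char → List String
  | [], cur => if cur = [] then [] else [String.mk cur]
  | c :: rest, cur =>
    if c = '\'' then
      if pvLeftAlpha rest then
        -- letter before the apostrophe: close the segment cur to its right
        (if cur = [] then pvGoB rest ['\''] else pvGoB rest ['\''] ++ [String.mk cur])
      else
        -- apostrophe starts a segment: '\'' :: cur is complete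
        pvGoB rest [] ++ [String.mk ('\'' :: cur)]
    else
      pvGoB rest (c :: cur)

def split_on_apostrophes_alt (text : String) : List String :=
  pvGoB text.toList.reverse []

-- ===== PRECONDITION & SPEC =====
def Spec_split_on_apostrophes (text : String) (out : List String) : Prop := out = split_on_apostrophes_alt text
instance (text : String) (out : List String) : Decidable (Spec_split_on_apostrophes text out) := by unfold Spec_split_on_apostrophes; infer_instance

-- ===== CLAIM (what is proved, stated in full; the proofs are below) =====
def Claim_equal_split_on_apostrophes : Prop := ∀ (text : String), Dom_split_on_apostrophes text → Spec_split_on_apostrophes text (split_on_apostrophes text)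

-- ===== LEMMAS AND PROOFS =====

theorem pvStepA_prev (st : List String × List Char × Bool) (ch : Char) :
    (pvStepA st ch).2.2 = PySem.Chars.isalpha ch := by
  obtain ⟨p, s, v⟩ := st
  simp only [pvStepA]
  split_ifs <;> rfl

-- the prev_is_alpha component of A's state after scanning rs.reverse is
-- "the head of rs is a letter" (false for rs = [])
theorem pvPrevA (rs : List Char) :
    ((rs.reverse).foldl pvStepA ([], [], false)).2.2 =
      (match rs with | p :: _ => PySem.Chars.isalpha p | [] => false) := by
  cases rs with
  | nil => rfl
  | cons c rest =>
    simp only [List.reverse_cons, List.foldl_append, List.foldl_cons, List.foldl_nil]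
    exact pvStepA_prev _ c

-- main invariant: B's right-to-left scan of rs with pending suffix cur produces
-- exactly A's parts on rs.reverse followed by the merged trailing segment
theorem pvMain (rs : List Char) : ∀ cur : List Char,
    pvGoB rs cur =
      ((rs.reverse).foldl pvStepA ([], [], false)).1 ++
        (if ((rs.reverse).foldl pvStepA ([], [], false)).2.1 ++ cur = [] then []
         else [String.mk (((rs.reverse).foldl pvStepA ([], [], false)).2.1 ++ cur)]) := by
  induction rs with
  | nil => intro cur; simp [pvGoB]
  | cons c rest ih =>
    intro cur
    have hsplit : ((c :: rest).reverse).foldl pvStepA ([], [], false)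
        = pvStepA ((rest.reverse).foldl pvStepA ([], [], false)) c := by
      simp
    rw [hsplit]
    by_cases hc : c = '\''
    · subst hc
      cases rest with
      | nil =>
        simp [pvGoB, pvStepA, pvLeftAlpha]
      | cons p rest' =>
        have hV := pvPrevA (p :: rest')
        rcases hF : ((p :: rest').reverse).foldl pvStepA ([], [], false) with ⟨P, S, V⟩
        rw [hF] at hV
        simp only at hV
        rw [pvGoB]
        simp only [pvLeftAlpha]
        by_cases hp : PySem.Chars.isalpha p = true
        · simp only [hp]
          by_cases hcur : cur = []
          · rw [if_pos hcur, ih ['\''], hF]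
            simp [pvStepA, hV, hp, hcur]
          · rw [if_neg hcur, ih ['\''], hF]
            simp [pvStepA, hV, hp, hcur]
        · rw [if_neg hp]
          rw [ih [], hF]
          by_cases hS : S = [] <;>
            simp [pvStepA, hV, hp, hS]
    · rw [pvGoB]
      rw [if_neg hc, ih (c :: cur)]
      rcases hF : ((rest.reverse).foldl pvStepA ([], [], false)) with ⟨P, S, V⟩
      simp [pvStepA, hc]

-- ===== VERDICT (by name: the statement is the Claim_ definition above) =====
theorem split_on_apostrophes_spec : Claim_equal_split_on_apostrophes := by
  intro text _
  unfold Spec_split_on_apostrophes split_on_apostrophes split_on_apostrophes_alt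
  rw [pvMain text.toList.reverse []]
  simp only [List.reverse_reverse, List.append_nil]
  by_cases h : text.toList = []
  · simp [h]
  · simp [h]
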